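-- pv_equiv track=rewrite | github.com/ProteinsWebTeam/pyinterprod | pyinterprod/memberdbupdate/filter_overlapping_methods.py | generateReportDict
-- ===== SOURCE A (Python) =====
-- def generateReportDict(report):
--     reportDict = {}
--     for line in report:
--         lines = []
--         line = line.strip()
--         method_ac = line.split("\t")[0]
--         if method_ac in reportDict:
--             lines = reportDict[method_ac]
--             lines.append(line)
--             reportDict[method_ac] = lines
--         else:
--             lines.append(line)
--             reportDict[method_ac] = lines
--     return reportDict
-- ===== SOURCE B (Python) =====
-- def generateReportDict(report):
--     # One pass to pair each stripped line with its key, then one group-building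
--     # pass over the distinct keys in first-occurrence order.
--     pairs = []
--     for line in report:
--         s = line.strip()
--         pairs.append((s.split("\t")[0], s))
--     keys = list(dict.fromkeys(k for k, _ in pairs))
--     return {k: [s for kk, s in pairs if kk == k] for k in keys}
-- ===== Notes on version B (the rewrite author's own statement) =====
-- stated objective: alternative
-- what changed: The incremental dict-of-lists accumulation (look up, append, re-store per line) is replaced by a precomputed (key, line) pair list, an ordered dedup of the keys via dict.fromkeys, and a comprehension that collects each key's lines by filtering the pair list, trading the single hash-table pass for a distinct-keys-then-filter decomposition.
import Mathlib
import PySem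

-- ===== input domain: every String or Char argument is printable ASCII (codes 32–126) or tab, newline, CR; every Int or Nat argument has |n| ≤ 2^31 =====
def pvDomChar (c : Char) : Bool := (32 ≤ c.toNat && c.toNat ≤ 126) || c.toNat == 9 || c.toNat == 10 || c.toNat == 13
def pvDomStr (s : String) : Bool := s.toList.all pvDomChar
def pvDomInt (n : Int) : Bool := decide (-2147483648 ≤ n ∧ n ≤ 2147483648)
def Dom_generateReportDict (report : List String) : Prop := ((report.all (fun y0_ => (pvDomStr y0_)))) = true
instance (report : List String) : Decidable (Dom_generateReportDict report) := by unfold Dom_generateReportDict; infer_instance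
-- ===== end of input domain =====

-- B replaces A's per-line dict look-up/append/re-store with a (key, stripped line) pair
-- list, an ordered dedup of the keys, and a filter per distinct key (alternative
-- decomposition, same results).

-- ===== PORT A =====
-- s.split("\t")[0]: split with a nonempty separator always returns some nonempty list,
-- so the [0] indexing never raises; the getD []/headD "" defaults are unreachable (exact).
def pvFirstField (s : String) : String :=
  ((PySem.Str.split? s "\t").getD []).headD ""

def generateReportDict (report : List String) : List (String × List String) :=
  (report.foldl (fun reportDict line =>
      -- lines = []; line = line.strip(); method_ac = line.split("\t")[0]
      let line := PySem.Str.strip line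
      let methodAc := pvFirstField line
      if reportDict.contains methodAc then
        -- lines = reportDict[method_ac]; lines.append(line); reportDict[method_ac] = lines
        reportDict.insert methodAc (reportDict.getD methodAc [] ++ [line])
      else
        -- lines.append(line); reportDict[method_ac] = lines
        reportDict.insert methodAc [line])
    PySem.Dict.empty).items

-- ===== PORT B =====
def generateReportDict_alt (report : List String) : List (String × List String) :=
  let pairs := report.map (fun line =>
    (pvFirstField (PySem.Str.strip line), PySem.Str.strip line))
  let keys := PySem.List.dedup (pairs.map (·.1))
  keys.map (fun k => (k, (pairs.filter (fun p => p.1 == k)).map (·.2)))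

-- ===== PRECONDITION & SPEC =====
def Spec_generateReportDict (report : List String) (out : List (String × List String)) : Prop := out = generateReportDict_alt report
instance (report : List String) (out : List (String × List String)) : Decidable (Spec_generateReportDict report out) := by unfold Spec_generateReportDict; infer_instance

-- ===== CLAIM (what is proved, stated in full; the proofs are below) =====
def Claim_equal_generateReportDict : Prop := ∀ (report : List String), Dom_generateReportDict report → Spec_generateReportDict report (generateReportDict report)

-- ===== LEMMAS AND PROOFS =====

-- A's branch on `contains` is exactly a Dict.modify with default [].
theorem stepA_eq_modify (d : PySem.Dict String (List String)) (k s : String) :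
    (if d.contains k then d.insert k (d.getD k [] ++ [s]) else d.insert k [s])
      = d.modify k [] (· ++ [s]) := by
  by_cases h : d.contains k = true
  · simp [h, PySem.Dict.modify]
  · have h' : d.contains k = false := by simpa using h
    rw [PySem.Dict.modify]
    simp [h', PySem.Dict.getD_of_not_contains _ _ h']

theorem generateReportDict_eq_alt (report : List String) :
    generateReportDict report = generateReportDict_alt report := by
  unfold generateReportDict generateReportDict_alt
  have hfold : report.foldl (fun reportDict line =>
      let line := PySem.Str.strip line
      let methodAc := pvFirstField line
      if reportDict.contains methodAc then
        reportDict.insert methodAc (reportDict.getD methodAc [] ++ [line])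
      else
        reportDict.insert methodAc [line]) PySem.Dict.empty
      = (report.map (fun line =>
          (pvFirstField (PySem.Str.strip line), PySem.Str.strip line))).foldl
          (fun d p => d.modify p.1 [] (· ++ [p.2])) PySem.Dict.empty := by
    rw [List.foldl_map]
    refine List.foldl_ext _ _ _ (fun d l _ => ?_)
    simpa using stepA_eq_modify d (pvFirstField (PySem.Str.strip l)) (PySem.Str.strip l)
  rw [hfold]
  generalize (report.map (fun line =>
    (pvFirstField (PySem.Str.strip line), PySem.Str.strip line))) = pairs
  have hnodup : (pairs.foldl (fun d p => d.modify p.1 [] (· ++ [p.2]))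
      PySem.Dict.empty).keys.Nodup :=
    PySem.Dict.nodup_keys_foldl_modify_key pairs Prod.fst []
      (fun _ p => (· ++ [p.2])) PySem.Dict.empty (by simp)
  rw [PySem.Dict.items_eq_map_keys _ hnodup []]
  have hkeys : (pairs.foldl (fun d p => d.modify p.1 [] (· ++ [p.2]))
      PySem.Dict.empty).keys = PySem.List.dedup (pairs.map (·.1)) := by
    rw [PySem.Dict.keys_foldl_modify_key pairs Prod.fst []
      (fun _ p => (· ++ [p.2])) PySem.Dict.empty]
    simp [PySem.Set.update, PySem.Set.ofList_eq_foldl]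
  rw [hkeys]
  refine List.map_congr_left (fun k _ => ?_)
  simp [PySem.Dict.getD_foldl_modify_append]

-- ===== VERDICT (by name: the statement is the Claim_ definition above) =====
theorem generateReportDict_spec : Claim_equal_generateReportDict :=
  fun report _ => generateReportDict_eq_alt report
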